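-- pv_equiv track=rewrite | github.com/BertrandBordage/django-tree | tree/sql/base.py | get_nearby_sibling_where_clause
-- ===== SOURCE A (Python) =====
-- from typing import List, Optional
--
-- def join_or(expressions: List[str]):
--     if len(expressions) == 1:
--         return expressions[0]
--     return f'({" OR ".join(expressions)})'
--
-- def join_and(expressions: List[str]):
--     return ' AND '.join(expressions)
--
-- def compare_columns(
--     left: str, right: str, greater: Optional[bool] = None,
--     strict: bool = False, nulls_last: bool = True,
-- ):
--     """
--     >>> compare_columns('name', 'NEW.name')
--     '(name IS NULL AND NEW.name IS NULL OR coalesce(name = NEW.name, FALSE))'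
--     >>> compare_columns('name', 'NEW.name', strict=True)
--     '(name IS NULL AND NEW.name IS NULL OR coalesce(name = NEW.name, FALSE))'
--     >>> compare_columns('name', 'NEW.name', nulls_last=False)
--     '(name IS NULL AND NEW.name IS NULL OR coalesce(name = NEW.name, FALSE))'
--     >>> compare_columns('name', 'NEW.name', greater=True)
--     '(name IS NULL OR coalesce(name >= NEW.name, FALSE))'
--     >>> compare_columns('name', 'NEW.name', greater=True, strict=True)
--     '(name IS NULL AND NEW.name IS NOT NULL OR coalesce(name > NEW.name, FALSE))'
--     >>> compare_columns('name', 'NEW.name', greater=True, strict=True, nulls_last=False)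
--     '(NEW.name IS NULL AND name IS NOT NULL OR coalesce(name > NEW.name, FALSE))'
--     >>> compare_columns('name', 'NEW.name', greater=False)
--     '(NEW.name IS NULL OR coalesce(name <= NEW.name, FALSE))'
--     >>> compare_columns('name', 'NEW.name', greater=False, strict=True)
--     '(NEW.name IS NULL AND name IS NOT NULL OR coalesce(name < NEW.name, FALSE))'
--     >>> compare_columns('name', 'NEW.name', greater=False, nulls_last=False)
--     '(name IS NULL OR coalesce(name <= NEW.name, FALSE))'
--     """
--     operator = {
--         None: '=',
--         True: '>' if strict else '>=',
--         False: '<' if strict else '<=',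
--     }[greater]
--     operation = f'coalesce({left} {operator} {right}, FALSE)'
--     if operator == '=':
--         null_condition = join_and([f'{left} IS NULL', f'{right} IS NULL'])
--     else:
--         null_on_right = not nulls_last if greater else nulls_last
--         null_condition = (
--             f'{right} IS NULL' if null_on_right
--             else f'{left} IS NULL'
--         )
--         if strict:
--             null_condition = join_and([
--                 null_condition,
--                 f'{left} IS NOT NULL' if null_on_right
--                 else f'{right} IS NOT NULL'
--             ])
--     return join_or([null_condition, operation])
--
-- def get_nearby_sibling_where_clause(
--     columns_in_order: List[str],
--     record_name: str,
--     greater: bool = True,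
--     nulls_last: bool = True,
-- ):
--     """
--     >>> get_nearby_sibling_where_clause(["col1"], 'NEW')
--     '(col1 IS NULL OR coalesce(col1 >= NEW.col1, FALSE))'
--     >>> get_nearby_sibling_where_clause(["col1"], 'NEW', greater=False)
--     '(NEW.col1 IS NULL OR coalesce(col1 <= NEW.col1, FALSE))'
--     >>> get_nearby_sibling_where_clause(["col1", "col2", "col3"], 'NEW', greater=True)
--     '((col1 IS NULL AND NEW.col1 IS NOT NULL OR coalesce(col1 > NEW.col1, FALSE)) OR (col1 IS NULL AND NEW.col1 IS NULL OR coalesce(col1 = NEW.col1, FALSE)) AND (col2 IS NULL AND NEW.col2 IS NOT NULL OR coalesce(col2 > NEW.col2, FALSE)) OR (col1 IS NULL AND NEW.col1 IS NULL OR coalesce(col1 = NEW.col1, FALSE)) AND (col2 IS NULL AND NEW.col2 IS NULL OR coalesce(col2 = NEW.col2, FALSE)) AND (col3 IS NULL OR coalesce(col3 >= NEW.col3, FALSE)))'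
--     """
--     return join_or([
--         join_and([
--             compare_columns(
--                 column,
--                 f'{record_name}.{column}',
--                 greater=greater if i == column_index - 1 else None,
--                 strict=column_index < len(columns_in_order),
--                 nulls_last=nulls_last,
--             )
--             for i, column in enumerate(columns_in_order[:column_index])
--         ])
--         for column_index in range(1, len(columns_in_order) + 1)
--     ])
-- ===== SOURCE B (Python) =====
-- from typing import List, Optional
--
--
-- def join_or(expressions: List[str]):
--     if len(expressions) == 1:
--         return expressions[0]
--     return f'({" OR ".join(expressions)})'
--
--
-- def join_and(expressions: List[str]):
--     return ' AND '.join(expressions)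
--
--
-- def compare_columns(
--     left: str, right: str, greater: Optional[bool] = None,
--     strict: bool = False, nulls_last: bool = True,
-- ):
--     operator = {
--         None: '=',
--         True: '>' if strict else '>=',
--         False: '<' if strict else '<=',
--     }[greater]
--     operation = f'coalesce({left} {operator} {right}, FALSE)'
--     if operator == '=':
--         null_condition = join_and([f'{left} IS NULL', f'{right} IS NULL'])
--     else:
--         null_on_right = not nulls_last if greater else nulls_last
--         null_condition = (
--             f'{right} IS NULL' if null_on_right
--             else f'{left} IS NULL'
--         )
--         if strict:
--             null_condition = join_and([
--                 null_condition,
--                 f'{left} IS NOT NULL' if null_on_right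
--                 else f'{right} IS NOT NULL'
--             ])
--     return join_or([null_condition, operation])
--
--
-- def get_nearby_sibling_where_clause(
--     columns_in_order: List[str],
--     record_name: str,
--     greater: bool = True,
--     nulls_last: bool = True,
-- ):
--     # Single forward pass: each equality comparison is built once and reused
--     # via the `equalities` accumulator, instead of being recomputed for every
--     # later row as in the nested-comprehension version.
--     n = len(columns_in_order)
--     rows = []
--     equalities = []
--     for idx, column in enumerate(columns_in_order):
--         right = f'{record_name}.{column}'
--         directional = compare_columns(
--             column, right, greater=greater,
--             strict=idx < n - 1, nulls_last=nulls_last,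
--         )
--         rows.append(join_and(equalities + [directional]))
--         equalities.append(compare_columns(column, right))
--     return join_or(rows)
-- ===== Notes on version B (the rewrite author's own statement) =====
-- stated objective: alternative
-- what changed: Replaces the nested comprehension that rebuilds every equality comparison for each row (quadratic number of compare_columns calls) with a single forward pass that accumulates the equality comparisons once in a list and appends one directional comparison per row.
import Mathlib
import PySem

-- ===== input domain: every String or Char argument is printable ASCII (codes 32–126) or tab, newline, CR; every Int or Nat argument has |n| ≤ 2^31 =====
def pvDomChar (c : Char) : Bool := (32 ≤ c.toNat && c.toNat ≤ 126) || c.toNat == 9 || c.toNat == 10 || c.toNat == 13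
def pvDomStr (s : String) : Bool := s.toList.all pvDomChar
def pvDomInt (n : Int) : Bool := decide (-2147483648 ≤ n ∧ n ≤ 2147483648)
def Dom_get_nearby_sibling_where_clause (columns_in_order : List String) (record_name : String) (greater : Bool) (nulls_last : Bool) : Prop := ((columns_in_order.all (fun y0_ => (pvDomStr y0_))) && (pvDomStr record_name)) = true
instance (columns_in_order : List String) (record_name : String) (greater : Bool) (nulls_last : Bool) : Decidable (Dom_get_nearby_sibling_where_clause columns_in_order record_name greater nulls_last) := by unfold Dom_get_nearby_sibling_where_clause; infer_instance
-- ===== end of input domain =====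

-- B replaces A's nested comprehension (which rebuilds every equality comparison for each row)
-- by a single forward pass that accumulates the equality comparisons once; objective: alternative decomposition.

-- ===== PORT A =====
-- shared module-level helpers (join_or, join_and, compare_columns), used by both Pythons
def pvJoinOr (expressions : List String) : String :=
  match expressions with
  | [e] => e
  | _ => "(" ++ PySem.Str.join " OR " expressions ++ ")"

def pvJoinAnd (expressions : List String) : String :=
  PySem.Str.join " AND " expressions

def pvCompareColumns (left right : String) (greater : Option Bool) (strict : Bool) (nulls_last : Bool) : String :=
  let operator : String :=
    match greater with
    | none => "="
    | some true => if strict then ">" else ">="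
    | some false => if strict then "<" else "<="
  let operation := "coalesce(" ++ left ++ " " ++ operator ++ " " ++ right ++ ", FALSE)"
  let null_condition :=
    if operator = "=" then
      pvJoinAnd [left ++ " IS NULL", right ++ " IS NULL"]
    else
      -- Python truthiness: `not nulls_last if greater else nulls_last` (greater is None/False/True)
      let null_on_right := if greater = some true then !nulls_last else nulls_last
      let nc := if null_on_right then right ++ " IS NULL" else left ++ " IS NULL"
      if strict then
        pvJoinAnd [nc, (if null_on_right then left ++ " IS NOT NULL" else right ++ " IS NOT NULL")]
      else nc
  pvJoinOr [null_condition, operation]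

def get_nearby_sibling_where_clause (columns_in_order : List String) (record_name : String) (greater : Bool) (nulls_last : Bool) : String :=
  pvJoinOr ((PySem.List.pyRange 1 ((columns_in_order.length : Int) + 1) 1).map (fun column_index =>
    pvJoinAnd ((PySem.List.enumerate (PySem.List.slice columns_in_order none (some column_index)) 0).map
      (fun p =>
        pvCompareColumns p.2 (record_name ++ "." ++ p.2)
          (if p.1 = column_index - 1 then some greater else none)
          (decide (column_index < (columns_in_order.length : Int)))
          nulls_last))))

-- ===== PORT B =====
def get_nearby_sibling_where_clause_alt (columns_in_order : List String) (record_name : String) (greater : Bool) (nulls_last : Bool) : String :=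
  let n : Int := (columns_in_order.length : Int)
  let res := (PySem.List.enumerate columns_in_order 0).foldl
    (fun (st : List String × List String) p =>
      let right := record_name ++ "." ++ p.2
      let directional := pvCompareColumns p.2 right (some greater) (decide (p.1 < n - 1)) nulls_last
      (st.1 ++ [pvJoinAnd (st.2 ++ [directional])],
       st.2 ++ [pvCompareColumns p.2 right none false true]))
    ([], [])
  pvJoinOr res.1

-- ===== PRECONDITION & SPEC =====
def Spec_get_nearby_sibling_where_clause (columns_in_order : List String) (record_name : String) (greater : Bool) (nulls_last : Bool) (out : String) : Prop := out = get_nearby_sibling_where_clause_alt columns_in_order record_name greater nulls_last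
instance (columns_in_order : List String) (record_name : String) (greater : Bool) (nulls_last : Bool) (out : String) : Decidable (Spec_get_nearby_sibling_where_clause columns_in_order record_name greater nulls_last out) := by unfold Spec_get_nearby_sibling_where_clause; infer_instance

-- ===== CLAIM (what is proved, stated in full; the proofs are below) =====
def Claim_equal_get_nearby_sibling_where_clause : Prop := ∀ (columns_in_order : List String) (record_name : String) (greater : Bool) (nulls_last : Bool), Dom_get_nearby_sibling_where_clause columns_in_order record_name greater nulls_last → Spec_get_nearby_sibling_where_clause columns_in_order record_name greater nulls_last (get_nearby_sibling_where_clause columns_in_order record_name greater nulls_last)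

-- ===== LEMMAS AND PROOFS =====

-- A's row for column_index k+1: the enumerate/map over the (k+1)-prefix splits into
-- the k equality terms followed by the directional term for column k.
theorem rowA_split (ys : List String) (k : Nat) (hk : k < ys.length)
    (dirf eqf : String → String) :
    (PySem.List.enumerate (ys.take (k + 1)) 0).map
        (fun p => if p.1 = (k : Int) then dirf p.2 else eqf p.2)
      = (ys.take k).map eqf ++ [dirf (ys.getD k "")] := by
  have htake : ys.take (k+1) = ys.take k ++ [ys[k]] := by
    rw [List.take_add_one]
    simp [List.getElem?_eq_getElem hk]
  rw [htake, PySem.List.enumerate_append, List.map_append]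
  have hlen : (ys.take k).length = k := by simp; omega
  congr 1
  · calc List.map (fun p => if p.1 = (k:Int) then dirf p.2 else eqf p.2) (PySem.List.enumerate (List.take k ys))
        = List.map (fun p => eqf p.2) (PySem.List.enumerate (List.take k ys)) := by
          apply List.map_congr_left
          intro p hp
          rw [PySem.List.mem_enumerate_iff] at hp
          obtain ⟨j, hj, rfl⟩ := hp
          have hj' : j ≠ k := by simp at hj; omega
          simp [hj']
      _ = List.map eqf (List.map Prod.snd (PySem.List.enumerate (List.take k ys))) := by
          rw [List.map_map]; rfl
      _ = List.map eqf (List.take k ys) := by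
          have := PySem.List.map_snd_enumerate (List.take k ys) 0
          simp only [show (Prod.snd : Int × String → String) = (fun p => p.2) from rfl]
          rw [this]
  · rw [hlen]
    simp [PySem.List.enumerate_cons, PySem.List.enumerate_nil, List.getD_eq_getElem?_getD,
      List.getElem?_eq_getElem hk]

-- B's loop invariant
theorem bloop (N : Int) (rn : String) (g nl : Bool) :
    ∀ (ys : List String) (j : Int) (rows eqs : List String),
    (PySem.List.enumerate ys j).foldl
      (fun (st : List String × List String) p =>
        (st.1 ++ [pvJoinAnd (st.2 ++ [pvCompareColumns p.2 (rn ++ "." ++ p.2) (some g) (decide (p.1 < N - 1)) nl])],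
         st.2 ++ [pvCompareColumns p.2 (rn ++ "." ++ p.2) none false true]))
      (rows, eqs)
    = (rows ++ (List.range ys.length).map (fun k =>
          pvJoinAnd ((eqs ++ (ys.take k).map (fun c => pvCompareColumns c (rn ++ "." ++ c) none false true))
            ++ [pvCompareColumns (ys.getD k "") (rn ++ "." ++ (ys.getD k "")) (some g) (decide (j + (k : Int) < N - 1)) nl])),
       eqs ++ ys.map (fun c => pvCompareColumns c (rn ++ "." ++ c) none false true)) := by
  intro ys
  induction ys with
  | nil => intro j rows eqs; simp [PySem.List.enumerate_nil]
  | cons y ys ih =>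
    intro j rows eqs
    rw [PySem.List.enumerate_cons, List.foldl_cons, ih]
    simp only [Prod.mk.injEq]
    constructor
    · show rows ++ [pvJoinAnd (eqs ++ [_])] ++ _ = rows ++ _
      rw [List.append_assoc]
      congr 1
      rw [List.length_cons, List.range_succ_eq_map, List.map_cons, List.map_map, List.singleton_append]
      congr 1
      · simp
      · apply List.map_congr_left
        intro k hk
        have h1 : decide (j + 1 + (k : Int) < N - 1) = decide (j + ((k : Int) + 1) < N - 1) := by
          rw [decide_eq_decide]; omega
        simp only [Function.comp_def, List.take_succ_cons, List.map_cons, List.getD_cons_succ,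
          h1, Nat.cast_succ, List.append_assoc, List.cons_append, List.nil_append]
    · simp

-- ===== VERDICT (by name: the statement is the Claim_ definition above) =====
theorem get_nearby_sibling_where_clause_spec : Claim_equal_get_nearby_sibling_where_clause := by
  intro cols rn g nl _
  unfold Spec_get_nearby_sibling_where_clause
  simp only [get_nearby_sibling_where_clause, get_nearby_sibling_where_clause_alt]
  rw [bloop ((cols.length : Int)) rn g nl cols 0 [] []]
  simp only [List.nil_append]
  congr 1
  rw [PySem.List.pyRange_one]
  have hn : (((cols.length : Int) + 1) - 1).toNat = cols.length := by omega
  rw [hn, List.map_map]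
  apply List.map_congr_left
  intro k hk
  rw [List.mem_range] at hk
  simp only [Function.comp_def]
  have hb : (0 : Int) ≤ 1 + (k : Int) := by omega
  rw [PySem.List.slice_to cols hb]
  have ht : ((1 : Int) + (k : Int)).toNat = k + 1 := by omega
  rw [ht]
  have hc : (1 : Int) + (k : Int) - 1 = (k : Int) := by ring
  rw [hc]
  have harr : (PySem.List.enumerate (cols.take (k + 1)) 0).map
      (fun p => pvCompareColumns p.2 (rn ++ "." ++ p.2)
        (if p.1 = (k : Int) then some g else none)
        (decide (1 + (k : Int) < (cols.length : Int))) nl)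
      = (PySem.List.enumerate (cols.take (k + 1)) 0).map
      (fun p => if p.1 = (k : Int)
        then pvCompareColumns p.2 (rn ++ "." ++ p.2) (some g) (decide (1 + (k : Int) < (cols.length : Int))) nl
        else pvCompareColumns p.2 (rn ++ "." ++ p.2) none (decide (1 + (k : Int) < (cols.length : Int))) nl) := by
    apply List.map_congr_left
    intro p _
    by_cases hp : p.1 = (k : Int) <;> simp [hp]
  rw [harr, rowA_split cols k hk
    (fun c => pvCompareColumns c (rn ++ "." ++ c) (some g) (decide (1 + (k : Int) < (cols.length : Int))) nl)
    (fun c => pvCompareColumns c (rn ++ "." ++ c) none (decide (1 + (k : Int) < (cols.length : Int))) nl)]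
  have hs : decide (1 + (k : Int) < (cols.length : Int))
      = decide (0 + (k : Int) < (cols.length : Int) - 1) := by
    rw [decide_eq_decide]; omega
  rw [hs]
  congr 1
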